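-- pv_equiv track=rewrite | github.com/ashwinnellimuttath/Algorithms-Coursework-UCR | 4assignment/challenge/6dog.py | compute_array_A
-- ===== SOURCE A (Python) =====
-- class SegmentTree:
--     def __init__(self, size):
--         self.size = size
--         self.tree = [0] * (4 * size)
--
--     def update(self, node, start, end, index, value):
--         if start == end:
--             self.tree[node] = max(self.tree[node], value)
--             return
--
--         mid = (start + end) // 2
--         if index <= mid:
--             self.update(2 * node + 1, start, mid, index, value)
--         else:
--             self.update(2 * node + 2, mid + 1, end, index, value)
--
--         self.tree[node] = max(self.tree[2 * node + 1], self.tree[2 * node + 2])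
--
--     def query(self, node, start, end, left, right):
--         if start > right or end < left:
--             return 0
--         if left > right:
--             return 0
--         if left <= start and end <= right:
--             return self.tree[node]
--         # if left == start and end == right:
--         #     return self.tree[node]
--
--         mid = (start + end) // 2
--         left_query = self.query(2 * node + 1, start, mid, left, right)
--         right_query = self.query(2 * node + 2, mid + 1, end, left, right)
--
--         return max(left_query, right_query)
--
-- def compute_array_A(S):
--     n = len(S)
--     ranks = compute_ranks(S)
--     segment_tree = SegmentTree(n)
--     A = [0] * n
--     for i in range(n):
--         rank_i = ranks[i]
--         A[rank_i-1] = S[i] * (n - i) + segment_tree.query(0, 0, n-1, 0, rank_i-1)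
--         segment_tree.update(0, 0, n-1 , rank_i, A[rank_i-1])
--     # return segment_tree.query(0, n - 1, 0, 0, n - 1),ranks
--     return segment_tree.query(0, 0, n-1, 0, n-1),A
--
-- def compute_ranks(S):
--     n = len(S)
--     p = [(S[i], i) for i in range(n)]
--     p.sort(key=lambda x: (x[0], -x[1]))
--     # p.sort()
--     indices = {}
--
--     # Populate the dictionary with the indices
--     for i, (x, _) in enumerate(p):
--         if x not in indices:
--             indices[x] = i
--
--     # Get the ranks based on the dictionary
--     ranks = [indices[x]+ 1 for x in S]
--
--     return ranks
-- ===== SOURCE B (Python) =====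
-- def compute_array_A(S):
--     n = len(S)
--     M = [0] * (n + 1)          # M[r] = best value stored so far for rank r
--     A = [0] * n
--     for i in range(n):
--         r = 1 + sum(1 for x in S if x < S[i])
--         best = 0
--         for q in range(1, r):
--             if M[q] > best:
--                 best = M[q]
--         val = S[i] * (n - i) + best
--         A[r - 1] = val
--         if val > M[r]:
--             M[r] = val
--     ans = 0
--     for q in range(1, n + 1):
--         if M[q] > ans:
--             ans = M[q]
--     return ans, A
-- ===== Notes on version B (the rewrite author's own statement) =====
-- stated objective: simpler
-- what changed: Replaces the recursive segment tree and the sort+dict rank computation with a plain best-value-per-rank array: each rank is obtained by directly counting strictly smaller elements, the prefix maximum is a linear scan of that array, and the final answer is one more linear scan.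
import Mathlib
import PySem

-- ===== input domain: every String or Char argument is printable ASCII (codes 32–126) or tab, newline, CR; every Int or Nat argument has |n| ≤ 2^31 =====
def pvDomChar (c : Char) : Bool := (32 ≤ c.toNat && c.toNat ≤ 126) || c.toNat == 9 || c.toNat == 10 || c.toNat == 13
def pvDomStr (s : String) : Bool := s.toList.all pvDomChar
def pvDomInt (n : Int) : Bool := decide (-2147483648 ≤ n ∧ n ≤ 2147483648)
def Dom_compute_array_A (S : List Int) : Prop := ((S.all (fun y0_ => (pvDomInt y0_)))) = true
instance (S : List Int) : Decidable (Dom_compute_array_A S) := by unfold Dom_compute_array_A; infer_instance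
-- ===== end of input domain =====

-- B replaces the rank-indexed recursive segment tree (and the sort/dict rank computation) by a plain
-- best-value-per-rank array with direct comparison counts and linear prefix scans: simpler, no tree, no sort.

-- ===== PORT A =====

def compute_ranks (S : List Int) : List Int :=
  let n : Int := PySem.List.len S
  let p := (PySem.List.pyRange 0 n 1).map (fun i => (PySem.List.pyGetD S i 0, i))
  let psorted := PySem.List.sorted2 p (fun x => x.1) (fun x => -x.2) false
  let indices : PySem.Dict Int Int :=
    (PySem.List.enumerate psorted).foldl
      (fun d xi => if d.contains xi.2.1 then d else d.insert xi.2.1 xi.1)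
      (PySem.Dict.mk [])
  S.map (fun x => indices.getD x 0 + 1)

-- fuel only bounds the recursion depth (Lean totality); every call below passes enough fuel
def st_update : Nat → List Int → Int → Int → Int → Int → Int → List Int
  | 0, tree, _, _, _, _, _ => tree
  | fuel+1, tree, node, start, e, index, value =>
    if start = e then
      PySem.List.pySetD tree node (max (PySem.List.pyGetD tree node 0) value)
    else
      let mid := PySem.Int.floordiv (start + e) 2
      let tree1 := if index ≤ mid
        then st_update fuel tree (2*node+1) start mid index value
        else st_update fuel tree (2*node+2) (mid+1) e index value
      PySem.List.pySetD tree1 node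
        (max (PySem.List.pyGetD tree1 (2*node+1) 0) (PySem.List.pyGetD tree1 (2*node+2) 0))

def st_query : Nat → List Int → Int → Int → Int → Int → Int → Int
  | 0, _, _, _, _, _, _ => 0
  | fuel+1, tree, node, start, e, left, right =>
    if start > right ∨ e < left then 0
    else if left > right then 0
    else if left ≤ start ∧ e ≤ right then PySem.List.pyGetD tree node 0
    else
      let mid := PySem.Int.floordiv (start + e) 2
      max (st_query fuel tree (2*node+1) start mid left right)
          (st_query fuel tree (2*node+2) (mid+1) e left right)

def compute_array_A (S : List Int) : Int × List Int :=
  let n : Int := PySem.List.len S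
  let ranks := compute_ranks S
  let st := (PySem.List.pyRange 0 n 1).foldl (fun (st : List Int × List Int) i =>
    let rank_i := PySem.List.pyGetD ranks i 0
    let a := PySem.List.pyGetD S i 0 * (n - i) +
             st_query (S.length + 1) st.1 0 0 (n-1) 0 (rank_i - 1)
    let A' := PySem.List.pySetD st.2 (rank_i - 1) a
    let tree' := st_update (S.length + 1) st.1 0 0 (n-1) rank_i a
    (tree', A'))
    (List.replicate (4 * S.length) 0, List.replicate S.length 0)
  (st_query (S.length + 1) st.1 0 0 (n-1) 0 (n-1), st.2)

-- ===== PORT B =====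

def compute_array_A_alt (S : List Int) : Int × List Int :=
  let n : Int := PySem.List.len S
  let st := (PySem.List.pyRange 0 n 1).foldl (fun (st : List Int × List Int) i =>
    let si := PySem.List.pyGetD S i 0
    let r : Int := 1 + S.foldl (fun c x => if x < si then c + 1 else c) 0
    let best := (PySem.List.pyRange 1 r 1).foldl
      (fun b q => if PySem.List.pyGetD st.1 q 0 > b then PySem.List.pyGetD st.1 q 0 else b) 0
    let v := si * (n - i) + best
    let A' := PySem.List.pySetD st.2 (r - 1) v
    let M' := if v > PySem.List.pyGetD st.1 r 0 then PySem.List.pySetD st.1 r v else st.1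
    (M', A'))
    (List.replicate (S.length + 1) 0, List.replicate S.length 0)
  let ans := (PySem.List.pyRange 1 (n+1) 1).foldl
      (fun b q => if PySem.List.pyGetD st.1 q 0 > b then PySem.List.pyGetD st.1 q 0 else b) 0
  (ans, st.2)

-- ===== PRECONDITION & SPEC =====
def Spec_compute_array_A (S : List Int) (out : Int × List Int) : Prop := out = compute_array_A_alt S
instance (S : List Int) (out : Int × List Int) : Decidable (Spec_compute_array_A S out) := by unfold Spec_compute_array_A; infer_instance

-- ===== CLAIM (what is proved, stated in full; the proofs are below) =====
def Claim_equal_compute_array_A : Prop := ∀ (S : List Int), Dom_compute_array_A S → Spec_compute_array_A S (compute_array_A S)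

-- ===== LEMMAS AND PROOFS =====

-- range maximum of an Int-valued function, with 0 as the base element (all tree cells start at 0)
def rmax (M : Int → Int) (s e : Int) : Int :=
  if e < s then 0 else max (rmax M s (e - 1)) (M e)
termination_by (e + 1 - s).toNat
decreasing_by omega

lemma rmax_empty (M : Int → Int) {s e : Int} (h : e < s) : rmax M s e = 0 := by
  rw [rmax]; simp [h]

lemma rmax_succ (M : Int → Int) {s e : Int} (h : s ≤ e) :
    rmax M s e = max (rmax M s (e - 1)) (M e) := by
  rw [rmax]; simp [show ¬ e < s by omega]

lemma rmax_nonneg (M : Int → Int) (s e : Int) : 0 ≤ rmax M s e := by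
  rw [rmax]
  split
  · exact le_refl 0
  · exact le_trans (rmax_nonneg M s (e-1)) (le_max_left _ _)
termination_by (e + 1 - s).toNat
decreasing_by omega

lemma rmax_zero (s e : Int) : rmax (fun _ => (0:Int)) s e = 0 := by
  rw [rmax]
  split
  · rfl
  · rw [rmax_zero s (e-1)]; simp
termination_by (e + 1 - s).toNat
decreasing_by omega

lemma rmax_congr (M M' : Int → Int) (s e : Int)
    (h : ∀ p, s ≤ p → p ≤ e → M p = M' p) : rmax M s e = rmax M' s e := by
  by_cases hc : e < s
  · rw [rmax_empty M hc, rmax_empty M' hc]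
  · have hc' : s ≤ e := by omega
    rw [rmax_succ M hc', rmax_succ M' hc',
        rmax_congr M M' s (e-1) (fun p h1 h2 => h p h1 (by omega)), h e hc' le_rfl]
termination_by (e + 1 - s).toNat
decreasing_by omega

lemma rmax_split (M : Int → Int) (s m e : Int) (h1 : s ≤ m) (h2 : m ≤ e + 1) :
    rmax M s e = max (rmax M s (m - 1)) (rmax M m e) := by
  by_cases hc : e < m
  · have hm : m = e + 1 := by omega
    subst hm
    rw [rmax_empty M (show e < e + 1 by omega)]
    rw [show e + 1 - 1 = e by ring]
    rw [max_eq_left (rmax_nonneg _ _ _)]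
  · have hc' : m ≤ e := by omega
    rw [rmax_succ M (show s ≤ e by omega), rmax_succ M hc',
        rmax_split M s m (e-1) h1 (by omega), max_assoc]
termination_by (e + 1 - m).toNat
decreasing_by omega

lemma rmax_point (M : Int → Int) (v : Int) (s e c : Int) (h1 : s ≤ c) (h2 : c ≤ e) :
    rmax (fun p => if p = c then max (M p) v else M p) s e = max (rmax M s e) v := by
  have hse : s ≤ e := le_trans h1 h2
  by_cases hc : c = e
  · subst hc
    rw [rmax_succ _ hse, rmax_succ M hse,
        rmax_congr _ M s (c-1) (fun p hp1 hp2 => by simp [show ¬ p = c by omega])]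
    rw [if_pos rfl, max_assoc]
  · have hce : c ≤ e - 1 := by omega
    rw [rmax_succ _ hse, rmax_succ M hse, rmax_point M v s (e-1) c h1 hce]
    rw [if_neg (show ¬ e = c by omega), max_right_comm]
termination_by (e + 1 - s).toNat
decreasing_by omega

-- heap-index descendants: Desc m d means d lies in the subtree rooted at index m
inductive Desc (m : Nat) : Nat → Prop where
  | refl : Desc m m
  | up {d : Nat} : m < d → Desc m ((d-1)/2) → Desc m d

lemma Desc_cases {m d : Nat} (h : Desc m d) : d = m ∨ (m < d ∧ Desc m ((d-1)/2)) := by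
  cases h with
  | refl => exact Or.inl rfl
  | up h1 h2 => exact Or.inr ⟨h1, h2⟩

lemma Desc_le {m d : Nat} (h : Desc m d) : m ≤ d := by
  cases h with
  | refl => exact le_rfl
  | up h1 _ => omega

lemma Desc_left {m d : Nat} (h : Desc (2*m+1) d) : Desc m d := by
  induction h with
  | refl =>
    refine Desc.up (by omega) ?_
    rw [show (2*m+1-1)/2 = m by omega]
    exact Desc.refl
  | up h1 h2 ih => exact Desc.up (by omega) ih

lemma Desc_right {m d : Nat} (h : Desc (2*m+2) d) : Desc m d := by
  induction h with
  | refl =>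
    refine Desc.up (by omega) ?_
    rw [show (2*m+2-1)/2 = m by omega]
    exact Desc.refl
  | up h1 h2 ih => exact Desc.up (by omega) ih

lemma Desc_disjoint {m : Nat} : ∀ d : Nat, Desc (2*m+1) d → Desc (2*m+2) d → False := by
  intro d h1 h2
  rcases Desc_cases h1 with rfl | ⟨ha, hb⟩
  · rcases Desc_cases h2 with heq | ⟨hc, hd⟩
    · omega
    · have := Desc_le hd; omega
  · rcases Desc_cases h2 with rfl | ⟨hc, hd⟩
    · rw [show (2*m+2-1)/2 = m by omega] at hb
      have := Desc_le hb; omega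
    · exact Desc_disjoint ((d-1)/2) hb hd
termination_by d => d
decreasing_by omega

-- the tree list represents range maxima of M over [s,e] at every node of the subtree
def STRepr : Nat → List Int → Nat → Int → Int → (Int → Int) → Prop
  | 0, _, _, _, _, _ => False
  | fuel+1, t, node, s, e, M =>
    node < t.length ∧ t.getD node 0 = rmax M s e ∧
    (s < e →
      STRepr fuel t (2*node+1) s (PySem.Int.floordiv (s+e) 2) M ∧
      STRepr fuel t (2*node+2) (PySem.Int.floordiv (s+e) 2 + 1) e M)

lemma mid_facts (s e : Int) :
    2 * PySem.Int.floordiv (s+e) 2 ≤ s + e ∧ s + e < 2 * PySem.Int.floordiv (s+e) 2 + 2 := by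
  have h := (PySem.Int.floordiv_eq_iff_of_pos (a := s+e) (b := 2)
      (q := PySem.Int.floordiv (s+e) 2) (by norm_num)).mp rfl
  omega

lemma STRepr_node {fuel : Nat} {t : List Int} {node : Nat} {s e : Int} {M : Int → Int}
    (h : STRepr fuel t node s e M) : node < t.length ∧ t.getD node 0 = rmax M s e := by
  cases fuel with
  | zero => exact absurd h (by simp [STRepr])
  | succ fuel => exact ⟨h.1, h.2.1⟩

lemma getD_pySetD_ne (t : List Int) (n j : Nat) (v : Int) (h : j ≠ n) :
    (PySem.List.pySetD t (n:Int) v).getD j 0 = t.getD j 0 := by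
  rw [PySem.List.pySetD_natCast, List.getD_eq_getElem?_getD,
      List.getElem?_set_ne (fun he => h he.symm), ← List.getD_eq_getElem?_getD]

lemma getD_pySetD_self (t : List Int) (n : Nat) (v : Int) (h : n < t.length) :
    (PySem.List.pySetD t (n:Int) v).getD n 0 = v := by
  rw [PySem.List.pySetD_natCast, List.getD_eq_getElem?_getD, List.getElem?_set_self h]
  rfl

lemma cast_child_left (node : Nat) : (2*(node:Int)+1) = ((2*node+1 : Nat) : Int) := by
  push_cast; ring

lemma cast_child_right (node : Nat) : (2*(node:Int)+2) = ((2*node+2 : Nat) : Int) := by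
  push_cast; ring

lemma st_update_length (fuel : Nat) (t : List Int) (node s e idx v : Int) :
    (st_update fuel t node s e idx v).length = t.length := by
  induction fuel generalizing t node s e with
  | zero => rfl
  | succ fuel ih =>
    simp only [st_update]
    split
    · simp [PySem.List.length_pySetD]
    · split
      · simp [PySem.List.length_pySetD, ih]
      · simp [PySem.List.length_pySetD, ih]

lemma st_update_frame (fuel : Nat) (t : List Int) (node : Nat) (s e idx v : Int)
    (j : Nat) (hj : ¬ Desc node j) :
    (st_update fuel t (node:Int) s e idx v).getD j 0 = t.getD j 0 := by
  induction fuel generalizing t node s e with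
  | zero => rfl
  | succ fuel ih =>
    have hjn : j ≠ node := fun h => hj (h ▸ Desc.refl)
    simp only [st_update]
    split
    · exact getD_pySetD_ne t node j _ hjn
    · split
      · rw [getD_pySetD_ne _ node j _ hjn, cast_child_left]
        exact ih t (2*node+1) s _ (fun hD => hj (Desc_left hD))
      · rw [getD_pySetD_ne _ node j _ hjn, cast_child_right]
        exact ih t (2*node+2) _ e (fun hD => hj (Desc_right hD))

lemma STRepr_congr (fuel : Nat) (t t' : List Int) (node : Nat) (s e : Int) (M : Int → Int)
    (hlen : t'.length = t.length)
    (h : ∀ j : Nat, Desc node j → t'.getD j 0 = t.getD j 0) :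
    STRepr fuel t node s e M → STRepr fuel t' node s e M := by
  induction fuel generalizing node s e with
  | zero => simp [STRepr]
  | succ fuel ih =>
    intro hrep
    obtain ⟨h1, h2, h3⟩ := hrep
    refine ⟨hlen ▸ h1, (h node Desc.refl).trans h2, fun hse => ?_⟩
    obtain ⟨hl, hr⟩ := h3 hse
    exact ⟨ih (2*node+1) s _ (fun j hD => h j (Desc_left hD)) hl,
           ih (2*node+2) _ e (fun j hD => h j (Desc_right hD)) hr⟩

lemma STRepr_congrM (fuel : Nat) (t : List Int) (node : Nat) (s e : Int) (M M' : Int → Int)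
    (h : ∀ p, s ≤ p → p ≤ e → M p = M' p) :
    STRepr fuel t node s e M → STRepr fuel t node s e M' := by
  induction fuel generalizing node s e with
  | zero => simp [STRepr]
  | succ fuel ih =>
    intro hrep
    obtain ⟨h1, h2, h3⟩ := hrep
    refine ⟨h1, h2.trans (rmax_congr M M' s e h), fun hse => ?_⟩
    obtain ⟨hl, hr⟩ := h3 hse
    have hm := mid_facts s e
    exact ⟨ih (2*node+1) s _ (fun p hp1 hp2 => h p hp1 (by omega)) hl,
           ih (2*node+2) _ e (fun p hp1 hp2 => h p (by omega) hp2) hr⟩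

lemma pow_clog_le (n : Nat) (hn : 1 ≤ n) : 2 * 2 ^ Nat.clog 2 n ≤ 4 * n + 1 := by
  rcases Nat.lt_or_ge n 2 with h | h
  · have hn1 : n = 1 := by omega
    subst hn1
    simp [Nat.clog_one_right]
  · have h1 : 1 < n := by omega
    have h2 : 2 ^ (Nat.clog 2 n - 1) < n := Nat.pow_pred_clog_lt_self (by norm_num) h1
    have h3 : 0 < Nat.clog 2 n := Nat.clog_pos (by norm_num) h1
    have h4 : 2 ^ Nat.clog 2 n = 2 * 2 ^ (Nat.clog 2 n - 1) := by
      rw [← pow_succ']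
      congr 1
      omega
    omega

lemma STRepr_init (fuel L : Nat) (node : Nat) (s e : Int) (hse : s ≤ e)
    (hfuel : (e - s).toNat < fuel)
    (hb : (node + 2) * 2 ^ Nat.clog 2 (e - s + 1).toNat ≤ L + 1) :
    STRepr fuel (List.replicate L (0:Int)) node s e (fun _ => 0) := by
  cases fuel with
  | zero => exact absurd hfuel (by omega)
  | succ fuel =>
    have hpow : 1 ≤ 2 ^ Nat.clog 2 (e - s + 1).toNat := Nat.one_le_two_pow
    have hnode : node < L := by nlinarith
    refine ⟨by simpa using hnode, ?_, fun hlt => ?_⟩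
    · rw [rmax_zero, List.getD_eq_getElem?_getD, List.getElem?_replicate]
      simp [hnode]
    · have hmb := mid_facts s e
      set mid := PySem.Int.floordiv (s+e) 2 with hmid
      have hsm : s ≤ mid := by omega
      have hmlt : mid < e := by omega
      set ℓ : Nat := (e - s + 1).toNat with hℓ
      have hℓ2 : 2 ≤ ℓ := by omega
      have hLn : (mid - s + 1).toNat = (ℓ + 1) / 2 := by omega
      have hRn : (e - (mid+1) + 1).toNat = ℓ / 2 := by omega
      have hcl : Nat.clog 2 ℓ = Nat.clog 2 ((ℓ+1)/2) + 1 := by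
        rw [Nat.clog_of_two_le (by norm_num) hℓ2, show (ℓ + 2 - 1) / 2 = (ℓ+1)/2 by omega]
      have hcR : Nat.clog 2 (ℓ/2) ≤ Nat.clog 2 ((ℓ+1)/2) :=
        Nat.clog_mono_right 2 (by omega)
      constructor
      · apply STRepr_init fuel L (2*node+1) s mid hsm (by omega)
        rw [hLn]
        calc (2*node+1+2) * 2 ^ Nat.clog 2 ((ℓ+1)/2)
            ≤ (2*node+4) * 2 ^ Nat.clog 2 ((ℓ+1)/2) :=
              Nat.mul_le_mul_right _ (by omega)
          _ = (node+2) * 2 ^ (Nat.clog 2 ((ℓ+1)/2) + 1) := by ring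
          _ = (node+2) * 2 ^ Nat.clog 2 ℓ := by rw [← hcl]
          _ ≤ L + 1 := hb
      · apply STRepr_init fuel L (2*node+2) (mid+1) e (by omega) (by omega)
        rw [hRn]
        calc (2*node+2+2) * 2 ^ Nat.clog 2 (ℓ/2)
            ≤ (2*node+4) * 2 ^ Nat.clog 2 ((ℓ+1)/2) :=
              Nat.mul_le_mul (by omega) (Nat.pow_le_pow_right (by norm_num) hcR)
          _ = (node+2) * 2 ^ (Nat.clog 2 ((ℓ+1)/2) + 1) := by ring
          _ = (node+2) * 2 ^ Nat.clog 2 ℓ := by rw [← hcl]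
          _ ≤ L + 1 := hb
termination_by fuel

lemma st_update_spec (fuel : Nat) (t : List Int) (node : Nat) (s e idx v : Int) (M : Int → Int)
    (hse : s ≤ e) (hidx : s ≤ idx) (hfuel : (e - s).toNat < fuel)
    (hrep : STRepr fuel t node s e M) :
    STRepr fuel (st_update fuel t (node:Int) s e idx v) node s e
      (fun p => if p = min idx e then max (M p) v else M p) := by
  cases fuel with
  | zero => exact absurd hfuel (by omega)
  | succ fuel =>
    obtain ⟨hnode, hval, hch⟩ := hrep
    by_cases hleaf : s = e
    · simp only [st_update]
      rw [if_pos hleaf]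
      refine ⟨?_, ?_, fun hse' => absurd hse' (by omega)⟩
      · rw [PySem.List.length_pySetD]; exact hnode
      · rw [getD_pySetD_self t node _ hnode, PySem.List.pyGetD_natCast, hval]
        rw [show min idx e = e by omega]
        rw [rmax_succ M hse, rmax_empty M (by omega)]
        rw [rmax_succ _ hse, rmax_empty _ (by omega)]
        rw [if_pos rfl]
        omega
    · have hlt : s < e := lt_of_le_of_ne hse hleaf
      obtain ⟨hchl, hchr⟩ := hch hlt
      have hmb := mid_facts s e
      simp only [st_update, if_neg hleaf]
      set mid := PySem.Int.floordiv (s+e) 2 with hmiddef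
      have hsm : s ≤ mid := by omega
      have hme' : mid + 1 ≤ e := by omega
      rw [cast_child_left, cast_child_right]
      by_cases hside : idx ≤ mid
      · rw [if_pos hside]
        set t1 := st_update fuel t ((2*node+1 : Nat) : Int) s mid idx v with ht1
        have hlen1 : t1.length = t.length := st_update_length ..
        have hminm : min idx mid = min idx e := by omega
        have hL := st_update_spec fuel t (2*node+1) s mid idx v M hsm hidx (by omega) hchl
        rw [hminm] at hL
        have hR : STRepr fuel t1 (2*node+2) (mid+1) e M :=
          STRepr_congr fuel t t1 (2*node+2) (mid+1) e M hlen1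
            (fun j hD => st_update_frame fuel t (2*node+1) s mid idx v j
              (fun hD' => Desc_disjoint j hD' hD)) hchr
        obtain ⟨hn1, hv1⟩ := STRepr_node hL
        obtain ⟨hn2, hv2⟩ := STRepr_node hR
        refine ⟨?_, ?_, fun _ => ?_⟩
        · rw [PySem.List.length_pySetD, hlen1]; exact hnode
        · rw [getD_pySetD_self t1 node _ (by rw [hlen1]; exact hnode)]
          rw [PySem.List.pyGetD_natCast, PySem.List.pyGetD_natCast, hv1, hv2]
          conv_rhs => rw [rmax_split (fun p => if p = min idx e then max (M p) v else M p)
              s (mid+1) e (by omega) (by omega)]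
          rw [show mid + 1 - 1 = mid by ring]
          congr 1
          exact (rmax_congr M _ (mid+1) e
            (fun p hp1 hp2 => by rw [if_neg (by omega : ¬ p = min idx e)]))
        · constructor
          · exact STRepr_congr fuel t1 _ (2*node+1) s mid _
              (by rw [PySem.List.length_pySetD])
              (fun j hD => getD_pySetD_ne _ node j _ (by have := Desc_le hD; omega)) hL
          · refine STRepr_congrM fuel _ (2*node+2) (mid+1) e M _
              (fun p hp1 hp2 => by rw [if_neg (by omega : ¬ p = min idx e)]) ?_
            exact STRepr_congr fuel t1 _ (2*node+2) (mid+1) e M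
              (by rw [PySem.List.length_pySetD])
              (fun j hD => getD_pySetD_ne _ node j _ (by have := Desc_le hD; omega)) hR
      · rw [if_neg hside]
        set t1 := st_update fuel t ((2*node+2 : Nat) : Int) (mid+1) e idx v with ht1
        have hlen1 : t1.length = t.length := st_update_length ..
        have hR := st_update_spec fuel t (2*node+2) (mid+1) e idx v M (by omega) (by omega)
          (by omega) hchr
        have hL : STRepr fuel t1 (2*node+1) s mid M :=
          STRepr_congr fuel t t1 (2*node+1) s mid M hlen1
            (fun j hD => st_update_frame fuel t (2*node+2) (mid+1) e idx v j
              (fun hD' => Desc_disjoint j hD hD')) hchl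
        obtain ⟨hn1, hv1⟩ := STRepr_node hL
        obtain ⟨hn2, hv2⟩ := STRepr_node hR
        refine ⟨?_, ?_, fun _ => ?_⟩
        · rw [PySem.List.length_pySetD, hlen1]; exact hnode
        · rw [getD_pySetD_self t1 node _ (by rw [hlen1]; exact hnode)]
          rw [PySem.List.pyGetD_natCast, PySem.List.pyGetD_natCast, hv1, hv2]
          conv_rhs => rw [rmax_split (fun p => if p = min idx e then max (M p) v else M p)
              s (mid+1) e (by omega) (by omega)]
          rw [show mid + 1 - 1 = mid by ring]
          congr 1
          exact (rmax_congr M _ s mid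
            (fun p hp1 hp2 => by rw [if_neg (by omega : ¬ p = min idx e)]))
        · constructor
          · refine STRepr_congrM fuel _ (2*node+1) s mid M _
              (fun p hp1 hp2 => by rw [if_neg (by omega : ¬ p = min idx e)]) ?_
            exact STRepr_congr fuel t1 _ (2*node+1) s mid M
              (by rw [PySem.List.length_pySetD])
              (fun j hD => getD_pySetD_ne _ node j _ (by have := Desc_le hD; omega)) hL
          · exact STRepr_congr fuel t1 _ (2*node+2) (mid+1) e _
              (by rw [PySem.List.length_pySetD])
              (fun j hD => getD_pySetD_ne _ node j _ (by have := Desc_le hD; omega)) hR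
termination_by fuel

lemma st_query_spec (fuel : Nat) (t : List Int) (node : Nat) (s e l r : Int) (M : Int → Int)
    (hse : s ≤ e) (hl : l ≤ s) (hfuel : (e - s).toNat < fuel)
    (hrep : STRepr fuel t node s e M) :
    st_query fuel t (node:Int) s e l r = if r < s then 0 else rmax M s (min e r) := by
  cases fuel with
  | zero => exact absurd hfuel (by omega)
  | succ fuel =>
    obtain ⟨hnode, hval, hch⟩ := hrep
    simp only [st_query]
    by_cases hr : r < s
    · rw [if_pos (Or.inl (by omega : s > r)), if_pos hr]
    · rw [if_neg (by omega : ¬ (s > r ∨ e < l)), if_neg (by omega : ¬ l > r), if_neg hr]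
      by_cases hfull : e ≤ r
      · rw [if_pos ⟨by omega, hfull⟩, PySem.List.pyGetD_natCast, hval,
            min_eq_left (by omega)]
      · rw [if_neg (fun hc : l ≤ s ∧ e ≤ r => absurd hc.2 (by omega))]
        have hlt : s < e := by omega
        obtain ⟨hchl, hchr⟩ := hch hlt
        have hmb := mid_facts s e
        set mid := PySem.Int.floordiv (s+e) 2 with hmiddef
        have hsm : s ≤ mid := by omega
        rw [cast_child_left, cast_child_right]
        rw [st_query_spec fuel t (2*node+1) s mid l r M (by omega) (by omega) (by omega) hchl,
            st_query_spec fuel t (2*node+2) (mid+1) e l r M (by omega) (by omega) (by omega) hchr]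
        by_cases hrm : r ≤ mid
        · rw [if_neg (by omega : ¬ r < s), if_pos (by omega : r < mid + 1),
              min_eq_right (by omega : r ≤ mid), min_eq_right (by omega : r ≤ e)]
          exact max_eq_left (rmax_nonneg _ _ _)
        · rw [if_neg (by omega : ¬ r < s), if_neg (by omega : ¬ r < mid+1),
              min_eq_left (by omega : mid ≤ r), min_eq_right (by omega : r ≤ e)]
          conv_rhs => rw [rmax_split M s (mid+1) r (by omega) (by omega)]
          rw [show mid + 1 - 1 = mid by ring]
termination_by fuel

-- ===== the rank computation =====

lemma getD_eq_get (S : List Int) (i : Nat) (h : i < S.length) : S.getD i 0 = S[i] := by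
  rw [List.getD_eq_getElem?_getD, List.getElem?_eq_getElem h]
  rfl

lemma insertBy_pairwise_rel {α : Type} (before : α → α → Bool) (R : α → α → Prop)
    (hTrans : ∀ a b c, R a b → R b c → R a c)
    (hT : ∀ a b, before a b = true → R a b) (hF : ∀ a b, before a b = false → R b a)
    (x : α) (ys : List α) (hys : ys.Pairwise R) :
    (PySem.List.insertBy before x ys).Pairwise R := by
  induction ys with
  | nil => simp [PySem.List.insertBy]
  | cons y ys ih =>
    rw [PySem.List.insertBy.eq_2]
    rw [List.pairwise_cons] at hys
    obtain ⟨hy, hys'⟩ := hys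
    by_cases hb : before x y = true
    · rw [if_pos hb]
      refine List.Pairwise.cons (fun z hz => ?_) (List.Pairwise.cons hy hys')
      rcases List.mem_cons.mp hz with rfl | hz'
      · exact hT _ _ hb
      · exact hTrans _ _ _ (hT _ _ hb) (hy z hz')
    · rw [if_neg hb]
      refine List.Pairwise.cons (fun z hz => ?_) (ih hys')
      rw [PySem.List.mem_insertBy] at hz
      rcases hz with rfl | hz'
      · exact hF _ _ (by simpa using hb)
      · exact hy z hz'

lemma sorted2_fst_mono (xs : List (Int × Int)) :
    (PySem.List.sorted2 xs (fun x => x.1) (fun x => -x.2) false).Pairwise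
      (fun a b => a.1 ≤ b.1) := by
  have key : ∀ (l acc : List (Int × Int)), acc.Pairwise (fun a b => a.1 ≤ b.1) →
      (l.foldl (fun acc x => PySem.List.insertBy
        (fun a b => decide (a.1 < b.1) || (!decide (b.1 < a.1) && decide (-a.2 < -b.2))) x acc)
        acc).Pairwise (fun a b : Int × Int => a.1 ≤ b.1) := by
    intro l
    induction l with
    | nil => intro acc h; simpa using h
    | cons z l ih =>
      intro acc h
      simp only [List.foldl_cons]
      apply ih
      apply insertBy_pairwise_rel _ (fun a b : Int × Int => a.1 ≤ b.1) (fun a b c h1 h2 => le_trans h1 h2) ?_ ?_ _ _ h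
      · intro a b hab
        simp only [Bool.or_eq_true, Bool.and_eq_true, decide_eq_true_eq,
          Bool.not_eq_true', decide_eq_false_iff_not] at hab
        rcases hab with h1 | ⟨h1, _⟩
        · omega
        · omega
      · intro a b hab
        simp only [Bool.or_eq_false_iff, Bool.and_eq_false_iff, decide_eq_false_iff_not,
          Bool.not_eq_false', decide_eq_true_eq] at hab
        omega
  simpa [PySem.List.sorted2] using key xs [] (by simp)

lemma dict_first_fold (l : List (Int × Int)) (m : Int) (d : PySem.Dict Int Int) (x : Int) :
    ((PySem.List.enumerate l m).foldl
        (fun d xi => if d.contains xi.2.1 then d else d.insert xi.2.1 xi.1) d).get? x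
      = if d.contains x = true then d.get? x
        else (PySem.List.index? (l.map (fun p => p.1)) x).map (fun k => m + (k:Int)) := by
  induction l generalizing m d with
  | nil =>
    rw [PySem.List.enumerate_nil]
    simp only [List.foldl_nil, List.map_nil]
    split
    · rfl
    · rename_i h
      have hc : d.contains x = false := by
        cases hcc : d.contains x
        · rfl
        · exact absurd hcc h
      rw [PySem.Dict.contains_eq_isSome_get?] at hc
      cases hg : d.get? x
      · simp [PySem.List.index?]
      · rw [hg] at hc; simp at hc
  | cons hd tl ih =>
    rw [PySem.List.enumerate_cons]
    simp only [List.foldl_cons, List.map_cons]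
    by_cases hc : d.contains hd.1 = true
    · rw [if_pos hc, ih (m+1) d]
      by_cases hx : d.contains x = true
      · rw [if_pos hx, if_pos hx]
      · rw [if_neg hx, if_neg hx]
        have hxh : hd.1 ≠ x := fun he => hx (he ▸ hc)
        rw [PySem.List.index?_cons_of_ne _ hxh]
        rcases hix : PySem.List.index? (List.map (fun p => p.1) tl) x with _ | k0
        · rw [hix]
          simp
        · rw [hix]
          simp
          try omega
    · rw [if_neg hc, ih (m+1) (d.insert hd.1 m)]
      by_cases hx : x = hd.1
      · subst hx
        rw [if_neg hc]
        have hcont : (d.insert hd.1 m).contains hd.1 = true := by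
          rw [PySem.Dict.contains_insert]
          simp
        rw [if_pos hcont, PySem.Dict.get?_insert, if_pos rfl,
            PySem.List.index?_cons_self]
        simp
      · have hcont : (d.insert hd.1 m).contains x = d.contains x := by
          rw [PySem.Dict.contains_insert]
          simp [hx]
        rw [hcont, PySem.Dict.get?_insert, if_neg hx]
        by_cases hdx : d.contains x = true
        · rw [if_pos hdx, if_pos hdx]
        · rw [if_neg hdx, if_neg hdx]
          have hxh : hd.1 ≠ x := fun he => hx he.symm
          rw [PySem.List.index?_cons_of_ne _ hxh]
          rcases hix : PySem.List.index? (List.map (fun p => p.1) tl) x with _ | k0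
          · rw [hix]
            simp
          · rw [hix]
            simp
            try omega

lemma compute_ranks_eq (S : List Int) :
    compute_ranks S = S.map (fun x => ((S.countP (fun y => decide (y < x)) : Int) + 1)) := by
  simp only [compute_ranks]
  apply List.map_congr_left
  intro x hx
  set p0 := (PySem.List.pyRange 0 (PySem.List.len S) 1).map
      (fun i => (PySem.List.pyGetD S i 0, i)) with hp0def
  set q := PySem.List.sorted2 p0 (fun x => x.1) (fun x => -x.2) false with hqdef
  have hp0 : p0.map (fun p => p.1) = S := by
    rw [hp0def, List.map_map]
    simp only [PySem.List.len_eq]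
    exact PySem.List.map_pyGetD_pyRange_zero' S 0
  have hperm : q.Perm p0 := PySem.List.sorted2_perm p0 _ _ false
  have hfstq : (q.map (fun p => p.1)).Perm S := by
    have h := hperm.map (fun p => p.1)
    rwa [hp0] at h
  have hxq : x ∈ q.map (fun p => p.1) := hfstq.mem_iff.mpr hx
  obtain ⟨k, hk⟩ := Option.isSome_iff_exists.mp
    ((PySem.List.index?_isSome_iff _ _).mpr hxq)
  obtain ⟨pre, suf, hdec, hlen, hnpre⟩ := (PySem.List.index?_eq_some_iff _ _ _).mp hk
  have hpw : (q.map (fun p => p.1)).Pairwise (fun a b : Int => a ≤ b) :=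
    List.pairwise_map.mpr (sorted2_fst_mono p0)
  rw [hdec] at hpw
  obtain ⟨hp1, hp2, hp3⟩ := List.pairwise_append.mp hpw
  have hcount : (q.map (fun p => p.1)).countP (fun y => decide (y < x)) = k := by
    rw [hdec, List.countP_append]
    have hA : pre.countP (fun y => decide (y < x)) = pre.length :=
      List.countP_eq_length.mpr (fun a ha => by
        have h1 := hp3 a ha x (List.mem_cons_self)
        have h2 : a ≠ x := fun he => hnpre (he ▸ ha)
        simp only [decide_eq_true_eq]
        omega)
    have hB : (x :: suf).countP (fun y => decide (y < x)) = 0 :=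
      List.countP_eq_zero.mpr (by
        intro a ha
        rcases List.mem_cons.mp ha with rfl | h
        · simp
        · have := (List.pairwise_cons.mp hp2).1 a h
          simp only [decide_eq_true_eq]
          omega)
    omega
  have hSc : S.countP (fun y => decide (y < x)) = k := by
    rw [← hcount]
    exact (hfstq.countP_eq _).symm
  have hg := dict_first_fold q 0 (PySem.Dict.mk []) x
  have hcmk : (PySem.Dict.mk ([] : List (Int × Int))).contains x = false := rfl
  rw [hcmk] at hg
  simp only [Bool.false_eq_true, if_false] at hg
  rw [hk] at hg
  simp at hg
  simp only [PySem.Dict.getD]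
  rw [hg]
  simp [hSc]

-- ===== rank-count facts =====

lemma two_le_countP (p : Int → Bool) (S : List Int) (i j : Nat) (hij : i < j)
    (hj : j < S.length) (hpi : p (S.getD i 0) = true) (hpj : p (S.getD j 0) = true) :
    2 ≤ S.countP p := by
  have hi : i < S.length := lt_trans hij hj
  have h1 : 0 < (S.take j).countP p := by
    apply List.countP_pos_iff.mpr
    have hit : i < (S.take j).length := by simp [List.length_take]; omega
    refine ⟨(S.take j)[i], List.getElem_mem hit, ?_⟩
    rw [List.getElem_take]
    rw [← getD_eq_get S i hi]
    exact hpi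
  have h2 : 0 < (S.drop j).countP p := by
    apply List.countP_pos_iff.mpr
    have hdt : 0 < (S.drop j).length := by simp [List.length_drop]; omega
    have h00 : (S.drop j)[0]? = some (S.getD j 0) := by
      rw [List.getElem?_drop, Nat.add_zero, List.getElem?_eq_getElem hj, getD_eq_get S j hj]
    refine ⟨(S.drop j)[0], List.getElem_mem hdt, ?_⟩
    have h01 : (S.drop j)[0] = S.getD j 0 := by
      have h02 := List.getElem?_eq_getElem (l := S.drop j) (i := 0) hdt
      rw [h00] at h02
      exact (Option.some.inj h02).symm
    rw [h01]
    exact hpj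
  have hsplit : (S.take j).countP p + (S.drop j).countP p = S.countP p := by
    rw [← List.countP_append, List.take_append_drop]
  omega

lemma countP_lt_length (S : List Int) (i : Nat) (hi : i < S.length) :
    S.countP (fun y => decide (y < S.getD i 0)) < S.length := by
  have hmem : S.getD i 0 ∈ S := by
    rw [getD_eq_get S i hi]
    exact List.getElem_mem hi
  rcases Nat.lt_or_ge (S.countP (fun y => decide (y < S.getD i 0))) S.length with h | h
  · exact h
  · exfalso
    have heq : S.countP (fun y => decide (y < S.getD i 0)) = S.length :=
      le_antisymm List.countP_le_length h
    have := List.countP_eq_length.mp heq _ hmem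
    simp at this

lemma cnt_unique (S : List Int) (i j : Nat) (hi : i < S.length) (hj : j < S.length)
    (hij : i ≠ j)
    (h1 : S.countP (fun y => decide (y < S.getD i 0)) = S.length - 1)
    (h2 : S.countP (fun y => decide (y < S.getD j 0)) = S.length - 1) : False := by
  rcases le_total (S.getD i 0) (S.getD j 0) with hle | hle
  · -- every element except one is < S.getD i 0, but both positions i and j fail the test
    have hcnt := List.length_eq_countP_add_countP (fun y => decide (y < S.getD i 0)) (l := S)
    have h2le : 2 ≤ S.countP (fun a => decide ¬(decide (a < S.getD i 0) = true)) := by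
      rcases Nat.lt_or_ge i j with hlt | hge
      · exact two_le_countP _ S i j hlt hj
          (by rw [decide_eq_true_eq, decide_eq_true_eq]; omega)
          (by rw [decide_eq_true_eq, decide_eq_true_eq]; omega)
      · have hlt : j < i := by omega
        exact two_le_countP _ S j i hlt hi
          (by rw [decide_eq_true_eq, decide_eq_true_eq]; omega)
          (by rw [decide_eq_true_eq, decide_eq_true_eq]; omega)
    omega
  · have hcnt := List.length_eq_countP_add_countP (fun y => decide (y < S.getD j 0)) (l := S)
    have h2le : 2 ≤ S.countP (fun a => decide ¬(decide (a < S.getD j 0) = true)) := by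
      rcases Nat.lt_or_ge i j with hlt | hge
      · exact two_le_countP _ S i j hlt hj
          (by rw [decide_eq_true_eq, decide_eq_true_eq]; omega)
          (by rw [decide_eq_true_eq, decide_eq_true_eq]; omega)
      · have hlt : j < i := by omega
        exact two_le_countP _ S j i hlt hi
          (by rw [decide_eq_true_eq, decide_eq_true_eq]; omega)
          (by rw [decide_eq_true_eq, decide_eq_true_eq]; omega)
    omega

-- ===== the loop equivalence =====

def mbF (M : List Int) (q : Int) : Int := if 0 ≤ q then M.getD q.toNat 0 else 0

def funA (n : Nat) (M : List Int) : Int → Int :=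
  fun p => if p = (n:Int) - 1 then max (mbF M p) (mbF M (p+1)) else mbF M p

lemma funA_apply (n : Nat) (M : List Int) (p : Int) :
    funA n M p = if p = (n:Int) - 1 then max (mbF M p) (mbF M (p+1)) else mbF M p := rfl

def stepA (S ranks : List Int) (n : Int) (fuel : Nat) (st : List Int × List Int) (i : Int) :
    List Int × List Int :=
  (st_update fuel st.1 0 0 (n-1) (PySem.List.pyGetD ranks i 0)
     (PySem.List.pyGetD S i 0 * (n - i) +
      st_query fuel st.1 0 0 (n-1) 0 (PySem.List.pyGetD ranks i 0 - 1)),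
   PySem.List.pySetD st.2 (PySem.List.pyGetD ranks i 0 - 1)
     (PySem.List.pyGetD S i 0 * (n - i) +
      st_query fuel st.1 0 0 (n-1) 0 (PySem.List.pyGetD ranks i 0 - 1)))

def stepB (S : List Int) (n : Int) (st : List Int × List Int) (i : Int) :
    List Int × List Int :=
  (if PySem.List.pyGetD S i 0 * (n - i) +
        (PySem.List.pyRange 1 (1 + S.foldl (fun c x => if x < PySem.List.pyGetD S i 0 then c + 1 else c) 0) 1).foldl
          (fun b q => if PySem.List.pyGetD st.1 q 0 > b then PySem.List.pyGetD st.1 q 0 else b) 0 >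
      PySem.List.pyGetD st.1 (1 + S.foldl (fun c x => if x < PySem.List.pyGetD S i 0 then c + 1 else c) 0) 0
   then PySem.List.pySetD st.1 (1 + S.foldl (fun c x => if x < PySem.List.pyGetD S i 0 then c + 1 else c) 0)
          (PySem.List.pyGetD S i 0 * (n - i) +
           (PySem.List.pyRange 1 (1 + S.foldl (fun c x => if x < PySem.List.pyGetD S i 0 then c + 1 else c) 0) 1).foldl
             (fun b q => if PySem.List.pyGetD st.1 q 0 > b then PySem.List.pyGetD st.1 q 0 else b) 0)
   else st.1,
   PySem.List.pySetD st.2 (1 + S.foldl (fun c x => if x < PySem.List.pyGetD S i 0 then c + 1 else c) 0 - 1)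
     (PySem.List.pyGetD S i 0 * (n - i) +
      (PySem.List.pyRange 1 (1 + S.foldl (fun c x => if x < PySem.List.pyGetD S i 0 then c + 1 else c) 0) 1).foldl
        (fun b q => if PySem.List.pyGetD st.1 q 0 > b then PySem.List.pyGetD st.1 q 0 else b) 0))

lemma compute_array_A_eq (S : List Int) :
    compute_array_A S =
      (st_query (S.length + 1)
        ((PySem.List.pyRange 0 (PySem.List.len S) 1).foldl
          (stepA S (compute_ranks S) (PySem.List.len S) (S.length + 1))
          (List.replicate (4 * S.length) 0, List.replicate S.length 0)).1
        0 0 (PySem.List.len S - 1) 0 (PySem.List.len S - 1),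
       ((PySem.List.pyRange 0 (PySem.List.len S) 1).foldl
          (stepA S (compute_ranks S) (PySem.List.len S) (S.length + 1))
          (List.replicate (4 * S.length) 0, List.replicate S.length 0)).2) := by
  rfl

lemma compute_array_A_alt_eq (S : List Int) :
    compute_array_A_alt S =
      ((PySem.List.pyRange 1 (PySem.List.len S + 1) 1).foldl
        (fun b q => if PySem.List.pyGetD
            ((PySem.List.pyRange 0 (PySem.List.len S) 1).foldl (stepB S (PySem.List.len S))
              (List.replicate (S.length + 1) 0, List.replicate S.length 0)).1 q 0 > b
          then PySem.List.pyGetD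
            ((PySem.List.pyRange 0 (PySem.List.len S) 1).foldl (stepB S (PySem.List.len S))
              (List.replicate (S.length + 1) 0, List.replicate S.length 0)).1 q 0 else b) 0,
       ((PySem.List.pyRange 0 (PySem.List.len S) 1).foldl (stepB S (PySem.List.len S))
          (List.replicate (S.length + 1) 0, List.replicate S.length 0)).2) := by
  rfl

lemma foldmax_eq_rmax (M : List Int) (a b : Int) (ha : 0 ≤ a) :
    (PySem.List.pyRange a b 1).foldl
      (fun x q => if PySem.List.pyGetD M q 0 > x then PySem.List.pyGetD M q 0 else x) 0
    = rmax (mbF M) a (b - 1) := by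
  by_cases hba : b ≤ a
  · rw [PySem.List.pyRange_one_eq_nil hba, List.foldl_nil, rmax_empty _ (by omega)]
  · have hab : a ≤ b - 1 := by omega
    rw [show (PySem.List.pyRange a b 1) = PySem.List.pyRange a ((b-1)+1) 1 by norm_num,
        PySem.List.pyRange_one_succ_right hab, List.foldl_append, List.foldl_cons,
        List.foldl_nil, foldmax_eq_rmax M a (b-1) ha, rmax_succ (mbF M) hab]
    have hpg : PySem.List.pyGetD M (b-1) 0 = mbF M (b-1) := by
      rw [mbF, if_pos (by omega : (0:Int) ≤ b - 1),
          show (b-1) = (((b-1).toNat : Nat) : Int) by omega, PySem.List.pyGetD_natCast]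
      simp
    rw [hpg]
    split
    · omega
    · omega
termination_by (b - a).toNat
decreasing_by omega

lemma mbF_nonneg (M : List Int) (h : ∀ q : Nat, 0 ≤ M.getD q 0) (q : Int) : 0 ≤ mbF M q := by
  rw [mbF]
  split
  · exact h _
  · exact le_refl 0

lemma mbF_update (M : List Int) (rn : Nat) (v : Int) (h1 : 1 ≤ rn) (h2 : rn < M.length)
    (q : Int) :
    mbF (if v > PySem.List.pyGetD M (rn:Int) 0 then PySem.List.pySetD M (rn:Int) v else M) q
      = if q = (rn:Int) then max (mbF M q) v else mbF M q := by
  have hpg : PySem.List.pyGetD M (rn:Int) 0 = M.getD rn 0 := PySem.List.pyGetD_natCast M rn 0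
  by_cases hv : v > PySem.List.pyGetD M (rn:Int) 0
  · rw [if_pos hv]
    by_cases hq0 : (0:Int) ≤ q
    · by_cases hqr : q = (rn:Int)
      · have hqt : q.toNat = rn := by omega
        rw [mbF, if_pos hq0, hqt, getD_pySetD_self M rn v h2, if_pos hqr, mbF, if_pos hq0, hqt]
        rw [hpg] at hv
        omega
      · have hqt : q.toNat ≠ rn := by omega
        rw [mbF, if_pos hq0, getD_pySetD_ne M rn q.toNat v hqt, if_neg hqr, mbF, if_pos hq0]
    · rw [mbF, if_neg hq0, if_neg (by omega : ¬ q = (rn:Int)), mbF, if_neg hq0]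
  · rw [if_neg hv]
    by_cases hqr : q = (rn:Int)
    · rw [if_pos hqr, mbF]
      rw [if_pos (by omega : (0:Int) ≤ q), show q.toNat = rn by omega]
      rw [hpg] at hv
      omega
    · rw [if_neg hqr]

def LoopInv (S : List Int) (k : Nat) (stA stB : List Int × List Int) : Prop :=
  stA.2 = stB.2 ∧ stB.1.length = S.length + 1 ∧ stA.1.length = 4 * S.length ∧
  stB.1.getD 0 0 = 0 ∧ (∀ q : Nat, 0 ≤ stB.1.getD q 0) ∧
  STRepr (S.length + 1) stA.1 0 0 ((S.length:Int) - 1) (funA S.length stB.1) ∧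
  (stB.1.getD S.length 0 = 0 ∨
   ∃ j : Nat, j < k ∧ S.countP (fun y => decide (y < S.getD j 0)) = S.length - 1)

lemma getD_replicate_zero (m q : Nat) : (List.replicate m (0:Int)).getD q 0 = 0 := by
  rw [List.getD_eq_getElem?_getD, List.getElem?_replicate]
  split <;> rfl

lemma LoopInv_init (S : List Int) (hn : 1 ≤ S.length) :
    LoopInv S 0 (List.replicate (4 * S.length) 0, List.replicate S.length 0)
            (List.replicate (S.length + 1) 0, List.replicate S.length 0) := by
  refine ⟨rfl, by simp, by simp, getD_replicate_zero _ _, fun q => by rw [getD_replicate_zero],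
    ?_, Or.inl (getD_replicate_zero _ _)⟩
  apply STRepr_congrM (S.length + 1) _ 0 0 ((S.length:Int) - 1) (fun _ => (0:Int)) _
    (fun p hp1 hp2 => by
      rw [funA]
      have hmb : ∀ t : Int, mbF (List.replicate (S.length + 1) (0:Int)) t = 0 := by
        intro t
        rw [mbF]
        split
        · rw [getD_replicate_zero]
        · rfl
      rw [hmb, hmb]
      split <;> simp)
  apply STRepr_init (S.length + 1) (4 * S.length) 0 0 ((S.length:Int) - 1)
    (by omega) (by omega)
  rw [show ((S.length:Int) - 1 - 0 + 1).toNat = S.length by omega]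
  have := pow_clog_le S.length hn
  omega

lemma rmax_one_zero (M : List Int) (h0 : M.getD 0 0 = 0) (b : Int) (hb : 0 ≤ b) :
    rmax (mbF M) 0 b = rmax (mbF M) 1 b := by
  have hmb0 : mbF M 0 = 0 := by
    rw [mbF, if_pos le_rfl]
    exact h0
  rcases eq_or_lt_of_le hb with hb0 | hbpos
  · rw [← hb0, rmax_succ _ le_rfl, rmax_empty _ (by omega), rmax_empty _ (by omega), hmb0]
    simp
  · rw [rmax_split (mbF M) 0 1 b (by omega) (by omega), show (1:Int)-1 = 0 by ring,
        rmax_succ _ le_rfl, rmax_empty _ (by omega), hmb0]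
    have := rmax_nonneg (mbF M) 1 b
    omega

lemma LoopInv_step (S : List Int) (hn : 1 ≤ S.length) (k : Nat) (hk : k < S.length)
    (stA stB : List Int × List Int) (h : LoopInv S k stA stB) :
    LoopInv S (k+1) (stepA S (compute_ranks S) (S.length:Int) (S.length + 1) stA (k:Int))
                (stepB S (S.length:Int) stB (k:Int)) := by
  obtain ⟨hAB, hlenB, hlenA, hM0, hMpos, hrep, huniq⟩ := h
  have hsi : PySem.List.pyGetD S (k:Int) 0 = S.getD k 0 := PySem.List.pyGetD_natCast S k 0
  have hcnt_lt : S.countP (fun y => decide (y < S.getD k 0)) < S.length :=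
    countP_lt_length S k hk
  set cnt := S.countP (fun y => decide (y < S.getD k 0)) with hcntdef
  have hfold : S.foldl (fun c x' => if x' < PySem.List.pyGetD S (k:Int) 0 then c + 1 else c)
      (0:Int) = (cnt : Int) := by
    rw [hsi]
    rw [show (fun (c : Int) (x' : Int) => if x' < S.getD k 0 then c + 1 else c)
        = (fun (c : Int) (x' : Int) =>
            if (fun y => decide (y < S.getD k 0)) x' = true then c + 1 else c) by
      funext c x'; simp]
    rw [PySem.List.foldl_count_if]
    omega
  have hrank : PySem.List.pyGetD (compute_ranks S) (k:Int) 0 = (cnt : Int) + 1 := by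
    rw [compute_ranks_eq, PySem.List.pyGetD_natCast, List.getD_eq_getElem?_getD,
        List.getElem?_map, List.getElem?_eq_getElem hk]
    simp only [Option.map_some, Option.getD_some]
    rw [← getD_eq_get S k hk]
    try omega
  have hq : rmax (funA S.length stB.1) 0 (cnt:Int) = rmax (mbF stB.1) 1 (cnt:Int) := by
    by_cases hcN : cnt = S.length - 1
    · have hMn : stB.1.getD S.length 0 = 0 := by
        rcases huniq with h0 | ⟨j, hjk, hjc⟩
        · exact h0
        · exact absurd hjc (fun hjc' =>
            cnt_unique S j k (by omega) hk (by omega) hjc' hcN)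
      have hmbn : mbF stB.1 ((S.length:Int) - 1 + 1) = 0 := by
        rw [mbF, if_pos (by omega), show ((S.length:Int) - 1 + 1).toNat = S.length by omega]
        exact hMn
      have hcc : (cnt : Int) = (S.length:Int) - 1 := by omega
      rw [hcc]
      rw [rmax_succ (funA S.length stB.1) (by omega : (0:Int) ≤ (S.length:Int) - 1)]
      rw [rmax_congr (funA S.length stB.1) (mbF stB.1) 0 ((S.length:Int) - 1 - 1)
          (fun p hp1 hp2 => by rw [funA_apply, if_neg (by omega)])]
      have hfa : funA S.length stB.1 ((S.length:Int) - 1)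
          = max (mbF stB.1 ((S.length:Int) - 1)) (mbF stB.1 ((S.length:Int) - 1 + 1)) := by
        rw [funA_apply, if_pos rfl]
      rw [hfa, hmbn]
      rw [← rmax_one_zero stB.1 hM0 ((S.length:Int) - 1) (by omega)]
      conv_rhs => rw [rmax_succ (mbF stB.1) (by omega : (0:Int) ≤ (S.length:Int) - 1)]
      have := mbF_nonneg stB.1 hMpos ((S.length:Int) - 1)
      omega
    · rw [rmax_congr (funA S.length stB.1) (mbF stB.1) 0 (cnt:Int)
          (fun p hp1 hp2 => by rw [funA_apply, if_neg (by omega)])]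
      exact rmax_one_zero stB.1 hM0 (cnt:Int) (by omega)
  set Q : Int := rmax (mbF stB.1) 1 (cnt:Int) with hQdef
  set v : Int := S.getD k 0 * ((S.length:Int) - (k:Int)) + Q with hvdef
  have hqA : st_query (S.length+1) stA.1 0 0 ((S.length:Int)-1) 0 ((cnt:Int)+1-1) = Q := by
    have hq0 := st_query_spec (S.length+1) stA.1 0 0 ((S.length:Int)-1) 0 ((cnt:Int)+1-1)
      (funA S.length stB.1) (by omega) le_rfl (by omega) hrep
    rw [Nat.cast_zero] at hq0
    rw [hq0, if_neg (by omega), show ((cnt:Int)+1-1) = (cnt:Int) by ring,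
        min_eq_right (by omega), hq]
  have hB_best : (PySem.List.pyRange 1 ((cnt:Int)+1) 1).foldl
      (fun b q => if PySem.List.pyGetD stB.1 q 0 > b then PySem.List.pyGetD stB.1 q 0 else b)
      0 = Q := by
    rw [foldmax_eq_rmax stB.1 1 ((cnt:Int)+1) (by norm_num),
        show ((cnt:Int)+1-1) = (cnt:Int) by ring]
  have hstepA : stepA S (compute_ranks S) (S.length:Int) (S.length+1) stA (k:Int) =
      (st_update (S.length+1) stA.1 0 0 ((S.length:Int)-1) ((cnt:Int)+1) v,
       PySem.List.pySetD stA.2 (cnt:Int) v) := by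
    rw [stepA, hrank, hsi, hqA, show ((cnt:Int)+1-1) = (cnt:Int) by ring, hvdef]
  have hstepB : stepB S (S.length:Int) stB (k:Int) =
      (if v > PySem.List.pyGetD stB.1 ((cnt:Int)+1) 0
       then PySem.List.pySetD stB.1 ((cnt:Int)+1) v else stB.1,
       PySem.List.pySetD stB.2 (cnt:Int) v) := by
    rw [stepB, hfold, show (1:Int) + (cnt:Int) = (cnt:Int) + 1 by ring, hsi, hB_best,
        show ((cnt:Int)+1-1) = (cnt:Int) by ring, hvdef]
  rw [hstepA, hstepB]
  have hcastc : ((cnt:Int)+1) = ((cnt+1 : Nat) : Int) := by push_cast; ring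
  have hpgB : PySem.List.pyGetD stB.1 ((cnt:Int)+1) 0 = stB.1.getD (cnt+1) 0 := by
    rw [hcastc, PySem.List.pyGetD_natCast]
  have hmb' : ∀ q : Int,
      mbF (if v > PySem.List.pyGetD stB.1 ((cnt:Int)+1) 0
           then PySem.List.pySetD stB.1 ((cnt:Int)+1) v else stB.1) q
        = if q = (cnt:Int)+1 then max (mbF stB.1 q) v else mbF stB.1 q := by
    intro q
    rw [hcastc]
    exact mbF_update stB.1 (cnt+1) v (by omega) (by omega) q
  have hlen' : (if v > PySem.List.pyGetD stB.1 ((cnt:Int)+1) 0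
      then PySem.List.pySetD stB.1 ((cnt:Int)+1) v else stB.1).length = S.length + 1 := by
    split
    · rw [PySem.List.length_pySetD, hlenB]
    · exact hlenB
  unfold LoopInv
  refine ⟨?_, ?_, ?_, ?_, ?_, ?_, ?_⟩
  · dsimp only
    rw [hAB]
  · exact hlen'
  · dsimp only
    rw [st_update_length, hlenA]
  · dsimp only
    split
    · rw [hcastc, getD_pySetD_ne _ _ _ _ (by omega)]
      exact hM0
    · exact hM0
  · intro q
    dsimp only
    split
    · rename_i hgt
      by_cases hq : q = cnt + 1
      · subst hq
        rw [hcastc, getD_pySetD_self _ _ _ (by omega)]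
        rw [hpgB] at hgt
        have := hMpos (cnt+1)
        omega
      · rw [hcastc, getD_pySetD_ne _ _ _ _ hq]
        exact hMpos q
    · exact hMpos q
  · dsimp only
    have hup := st_update_spec (S.length+1) stA.1 0 0 ((S.length:Int)-1) ((cnt:Int)+1) v
      (funA S.length stB.1) (by omega) (by omega) (by omega) hrep
    rw [Nat.cast_zero] at hup
    refine STRepr_congrM (S.length+1) _ 0 0 ((S.length:Int)-1) _ _ ?_ hup
    intro p hp1 hp2
    simp only [funA_apply, hmb']
    by_cases hp : p = (S.length:Int) - 1
    · rw [if_pos hp, if_pos hp]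
      by_cases hc1 : (cnt:Int) + 1 ≤ (S.length:Int) - 1
      · rw [min_eq_left hc1]
        by_cases hc2 : (cnt:Int) + 1 = (S.length:Int) - 1
        · rw [if_pos (by omega : p = (cnt:Int)+1), if_pos (by omega : p = (cnt:Int)+1),
              if_neg (by omega : ¬ p + 1 = (cnt:Int)+1)]
          omega
        · rw [if_neg (by omega : ¬ p = (cnt:Int)+1), if_neg (by omega : ¬ p = (cnt:Int)+1),
              if_neg (by omega : ¬ p + 1 = (cnt:Int)+1)]
      · rw [min_eq_right (by omega : (S.length:Int) - 1 ≤ (cnt:Int)+1), if_pos hp,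
            if_neg (by omega : ¬ p = (cnt:Int)+1), if_pos (by omega : p + 1 = (cnt:Int)+1)]
        omega
    · rw [if_neg hp, if_neg hp]
      by_cases hpr : p = (cnt:Int) + 1
      · rw [if_pos (by omega : p = min ((cnt:Int)+1) ((S.length:Int)-1)), if_pos hpr]
      · rw [if_neg (by omega : ¬ p = min ((cnt:Int)+1) ((S.length:Int)-1)), if_neg hpr]
  · dsimp only
    by_cases hcN : cnt = S.length - 1
    · exact Or.inr ⟨k, by omega, hcN⟩
    · have hMn' : (if v > PySem.List.pyGetD stB.1 ((cnt:Int)+1) 0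
          then PySem.List.pySetD stB.1 ((cnt:Int)+1) v else stB.1).getD S.length 0
          = stB.1.getD S.length 0 := by
        split
        · rw [hcastc, getD_pySetD_ne _ _ _ _ (by omega)]
        · rfl
      rw [hMn']
      rcases huniq with h0 | ⟨j, hjk, hjc⟩
      · exact Or.inl h0
      · exact Or.inr ⟨j, by omega, hjc⟩

lemma loop_inv (S : List Int) (hn : 1 ≤ S.length) (k : Nat) (hk : k ≤ S.length) :
    LoopInv S k
      ((PySem.List.pyRange 0 (k:Int) 1).foldl
        (stepA S (compute_ranks S) (S.length:Int) (S.length + 1))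
        (List.replicate (4 * S.length) 0, List.replicate S.length 0))
      ((PySem.List.pyRange 0 (k:Int) 1).foldl
        (stepB S (S.length:Int))
        (List.replicate (S.length + 1) 0, List.replicate S.length 0)) := by
  induction k with
  | zero =>
    simpa [PySem.List.pyRange_one_eq_nil (by omega : (0:Int) ≤ 0)] using LoopInv_init S hn
  | succ k ih =>
    have hk' : k ≤ S.length := by omega
    have h1 : ((k+1 : Nat) : Int) = ((k:Nat) : Int) + 1 := by push_cast; ring
    rw [h1, PySem.List.pyRange_one_succ_right (by exact_mod_cast Nat.zero_le k),
        List.foldl_append, List.foldl_append]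
    simpa using LoopInv_step S hn k (by omega) _ _ (ih hk')

lemma main_equal (S : List Int) : compute_array_A S = compute_array_A_alt S := by
  rcases Nat.eq_zero_or_pos S.length with h0 | hpos
  · have hS : S = [] := by
      cases S with
      | nil => rfl
      | cons a t => simp at h0
    subst hS
    decide
  · have hInv := loop_inv S hpos S.length le_rfl
    rw [compute_array_A_eq, compute_array_A_alt_eq]
    simp only [PySem.List.len_eq]
    set FA := (PySem.List.pyRange 0 ((S.length:Int)) 1).foldl
      (stepA S (compute_ranks S) ((S.length:Int)) (S.length + 1))
      (List.replicate (4 * S.length) 0, List.replicate S.length 0) with hFA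
    set FB := (PySem.List.pyRange 0 ((S.length:Int)) 1).foldl (stepB S ((S.length:Int)))
      (List.replicate (S.length + 1) 0, List.replicate S.length 0) with hFB
    obtain ⟨hAB, hlenB, hlenA, hM0, hMpos, hrep, _⟩ := hInv
    refine Prod.ext ?_ ?_
    · dsimp only
      have hqA := st_query_spec (S.length+1) FA.1 0 0 ((S.length:Int)-1) 0 ((S.length:Int)-1)
        (funA S.length FB.1) (by omega) le_rfl (by omega) hrep
      rw [Nat.cast_zero] at hqA
      rw [hqA, if_neg (by omega), min_self]
      rw [foldmax_eq_rmax FB.1 1 ((S.length:Int)+1) (by norm_num),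
          show ((S.length:Int)+1-1) = (S.length:Int) by ring]
      rw [rmax_succ (funA S.length FB.1) (by omega : (0:Int) ≤ (S.length:Int) - 1)]
      rw [rmax_congr (funA S.length FB.1) (mbF FB.1) 0 ((S.length:Int) - 1 - 1)
          (fun p hp1 hp2 => by rw [funA_apply, if_neg (by omega)])]
      have hfa : funA S.length FB.1 ((S.length:Int) - 1)
          = max (mbF FB.1 ((S.length:Int) - 1)) (mbF FB.1 ((S.length:Int) - 1 + 1)) := by
        rw [funA_apply, if_pos rfl]
      rw [hfa]
      rw [← rmax_one_zero FB.1 hM0 ((S.length:Int)) (by omega)]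
      conv_rhs => rw [rmax_succ (mbF FB.1) (by omega : (0:Int) ≤ (S.length:Int)),
          rmax_succ (mbF FB.1) (by omega : (0:Int) ≤ (S.length:Int) - 1)]
      rw [show ((S.length:Int) - 1 + 1) = (S.length:Int) by ring]
      omega
    · exact hAB

-- ===== VERDICT (by name: the statement is the Claim_ definition above) =====
theorem compute_array_A_spec : Claim_equal_compute_array_A := by
  intro S _
  unfold Spec_compute_array_A
  exact main_equal S
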